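-- pv_equiv track=rewrite | github.com/vladimir-demchenko/python_task | task_B428.py | change_minimal_3_7
-- ===== SOURCE A (Python) =====
-- def sort_key(e):
--   return e[1]
--
-- def change_minimal_3_7(one_line, score):
--   tmp = one_line.split(' ')
--   score = sorted(score, key=sort_key)
--   minimum = score[0][1]
--   for i in range(len(tmp)):
--     for j in score:
--       if tmp[i].lower() == j[0] and j[1] == minimum:
--         tmp[i] = 'PYTHON'
--   return tmp
-- ===== SOURCE B (Python) =====
-- def change_minimal_3_7(one_line, score):
--   minimum = min(v for _, v in score)
--   winners = {w for w, v in score if v == minimum}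
--   return ['PYTHON' if w.lower() in winners else w for w in one_line.split(' ')]
-- ===== Notes on version B (the rewrite author's own statement) =====
-- stated objective: faster
-- what changed: Replaces the sort plus nested word-by-score scan with a single pass computing the minimum and a set of minimum-score words, then one membership test per word.
import Mathlib
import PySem

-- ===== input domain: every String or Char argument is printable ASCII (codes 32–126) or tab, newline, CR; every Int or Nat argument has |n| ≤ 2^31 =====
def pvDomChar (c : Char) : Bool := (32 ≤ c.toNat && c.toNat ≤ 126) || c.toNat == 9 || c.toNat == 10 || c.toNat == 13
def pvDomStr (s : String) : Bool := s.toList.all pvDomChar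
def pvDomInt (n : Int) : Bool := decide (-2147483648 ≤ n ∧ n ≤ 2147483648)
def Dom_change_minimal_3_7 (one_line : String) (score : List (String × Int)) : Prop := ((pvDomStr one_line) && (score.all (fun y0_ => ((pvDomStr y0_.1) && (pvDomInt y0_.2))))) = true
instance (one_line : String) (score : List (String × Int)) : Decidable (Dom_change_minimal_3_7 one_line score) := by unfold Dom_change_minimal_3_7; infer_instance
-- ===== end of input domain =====

-- B replaces A's sort + nested word-by-score scan by one pass (min + set of minimum-score
-- words) and a single membership test per word; equivalence of return values is proved.

-- ===== PORT A =====
def change_minimal_3_7 (one_line : String) (score : List (String × Int)) : List String :=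
  let tmp := (PySem.Str.split? one_line " ").getD []   -- sep " " ≠ "": split? is some
  let score := PySem.List.sorted score (fun e => e.2)
  match PySem.List.pyGet? score 0 with
  | none => []   -- IndexError on empty score; excluded by Pre_
  | some e0 =>
    let minimum := e0.2
    (PySem.List.pyRange 0 tmp.length 1).foldl (fun tmp i =>
      score.foldl (fun tmp j =>
        -- tmp[i] read/written with the total forms; i ∈ range(len(tmp)) is always in range
        if PySem.Str.lower (PySem.List.pyGetD tmp i "") == j.1 && j.2 == minimum
        then PySem.List.pySetD tmp i "PYTHON" else tmp) tmp) tmp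

-- ===== PORT B =====
def change_minimal_3_7_alt (one_line : String) (score : List (String × Int)) : List String :=
  match PySem.List.min? (score.map (fun p => p.2)) (fun v => v) with
  | none => []   -- ValueError on empty score; excluded by Pre_
  | some minimum =>
    let winners : PySem.Set String :=
      PySem.Set.ofList ((score.filter (fun p => p.2 == minimum)).map (fun p => p.1))
    ((PySem.Str.split? one_line " ").getD []).map (fun w =>
      if PySem.Set.contains winners (PySem.Str.lower w) then "PYTHON" else w)

-- ===== PRECONDITION & SPEC =====
-- On score = [] the Python A raises IndexError (score[0]); excluded.
def Pre_change_minimal_3_7 (one_line : String) (score : List (String × Int)) : Prop := score ≠ []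
instance (one_line : String) (score : List (String × Int)) : Decidable (Pre_change_minimal_3_7 one_line score) := by unfold Pre_change_minimal_3_7; infer_instance
def pvWitness_change_minimal_3_7 : String × (List (String × Int)) := ("a b", [("a", 1), ("b", 2)])

def Spec_change_minimal_3_7 (one_line : String) (score : List (String × Int)) (out : List String) : Prop := out = change_minimal_3_7_alt one_line score
instance (one_line : String) (score : List (String × Int)) (out : List String) : Decidable (Spec_change_minimal_3_7 one_line score out) := by unfold Spec_change_minimal_3_7; infer_instance

-- ===== CLAIM (what is proved, stated in full; the proofs are below) =====
def Claim_equal_change_minimal_3_7 : Prop := ∀ (one_line : String) (score : List (String × Int)), Dom_change_minimal_3_7 one_line score → Pre_change_minimal_3_7 one_line score → Spec_change_minimal_3_7 one_line score (change_minimal_3_7 one_line score)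

-- ===== LEMMAS AND PROOFS =====

-- reading / writing the middle element of pre ++ w :: rest at index pre.length
theorem pv_getD_mid (pre rest : List String) (w : String) :
    (pre ++ w :: rest).getD pre.length "" = w := by
  simp [List.getD]

theorem pv_set_mid (pre rest : List String) (w v : String) :
    (pre ++ w :: rest).set pre.length v = pre ++ v :: rest := by
  simp

-- the inner for-j loop only rewrites position i = pre.length, by the per-word fold
theorem pv_inner_fold (L : List (String × Int)) (m : Int) :
    ∀ (w : String) (pre rest : List String),
    L.foldl (fun acc j =>
        if PySem.Str.lower (PySem.List.pyGetD acc (pre.length : Int) "") == j.1 && j.2 == m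
        then PySem.List.pySetD acc (pre.length : Int) "PYTHON" else acc) (pre ++ w :: rest)
    = pre ++ (L.foldl (fun cur j => if PySem.Str.lower cur == j.1 && j.2 == m then "PYTHON" else cur) w) :: rest := by
  induction L with
  | nil => intro w pre rest; rfl
  | cons j t ih =>
    intro w pre rest
    simp only [List.foldl_cons]
    have hget : PySem.List.pyGetD (pre ++ w :: rest) (pre.length : Int) "" = w := by
      rw [PySem.List.pyGetD_natCast]; exact pv_getD_mid pre rest w
    rw [hget]
    split_ifs with h
    · rw [PySem.List.pySetD_natCast, pv_set_mid]; exact ih "PYTHON" pre rest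
    · exact ih w pre rest

-- the outer for-i loop over range(len) maps the per-word fold over the suffix
theorem pv_outer_fold (L : List (String × Int)) (m : Int) :
    ∀ (post pre : List String),
    (PySem.List.pyRange (pre.length : Int) ((pre.length + post.length : Nat) : Int) 1).foldl
      (fun acc i =>
        L.foldl (fun acc2 j =>
          if PySem.Str.lower (PySem.List.pyGetD acc2 i "") == j.1 && j.2 == m
          then PySem.List.pySetD acc2 i "PYTHON" else acc2) acc) (pre ++ post)
    = pre ++ post.map (fun w => L.foldl (fun cur j => if PySem.Str.lower cur == j.1 && j.2 == m then "PYTHON" else cur) w) := by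
  intro post
  induction post with
  | nil =>
    intro pre
    simp
  | cons w post ih =>
    intro pre
    have hlt : (pre.length : Int) < ((pre.length + (w :: post).length : Nat) : Int) := by
      have h0 : pre.length < pre.length + (w :: post).length := by simp
      exact_mod_cast h0
    rw [PySem.List.pyRange_one_cons hlt, List.foldl_cons, pv_inner_fold L m w pre post]
    have := ih (pre ++ [L.foldl (fun cur j => if PySem.Str.lower cur == j.1 && j.2 == m then "PYTHON" else cur) w])
    simp only [List.length_append, List.length_cons] at this ⊢
    have harg : ((pre.length : Int) + 1) = ((pre.length + 1 : Nat) : Int) := by push_cast; ring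
    have hb : ((pre.length + (post.length + 1) : Nat) : Int) = ((pre.length + 1 + post.length : Nat) : Int) := by
      push_cast; ring
    rw [harg, hb]
    simpa using this

-- once a slot holds "PYTHON" the per-word fold keeps it
theorem pv_fold_python (L : List (String × Int)) (m : Int) :
    L.foldl (fun cur j => if PySem.Str.lower cur == j.1 && j.2 == m then "PYTHON" else cur) "PYTHON" = "PYTHON" := by
  induction L with
  | nil => rfl
  | cons j t ih => simpa [ite_self] using ih

-- the per-word fold is the existence test over the list
theorem pv_fold_any (L : List (String × Int)) (m : Int) (w : String) :
    L.foldl (fun cur j => if PySem.Str.lower cur == j.1 && j.2 == m then "PYTHON" else cur) w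
    = if L.any (fun j => PySem.Str.lower w == j.1 && j.2 == m) then "PYTHON" else w := by
  induction L with
  | nil => rfl
  | cons j t ih =>
    by_cases h : (PySem.Str.lower w == j.1 && j.2 == m) = true
    · rw [List.foldl_cons, if_pos h, pv_fold_python, List.any_cons, h, Bool.true_or, if_pos rfl]
    · have hf : (PySem.Str.lower w == j.1 && j.2 == m) = false := Bool.eq_false_iff.mpr h
      rw [List.foldl_cons, if_neg h, ih, List.any_cons, hf, Bool.false_or]

-- any over the sorted list = any over the original (permutation)
theorem pv_any_sorted (score : List (String × Int)) (p : String × Int → Bool) :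
    (PySem.List.sorted score (fun e => e.2)).any p = score.any p := by
  rw [Bool.eq_iff_iff]
  simp only [List.any_eq_true]
  constructor
  · rintro ⟨j, hj, hp⟩; exact ⟨j, (PySem.List.mem_sorted score (fun e => e.2) false j).mp hj, hp⟩
  · rintro ⟨j, hj, hp⟩; exact ⟨j, (PySem.List.mem_sorted score (fun e => e.2) false j).mpr hj, hp⟩

-- B's set membership = the existence test over score
theorem pv_mem_winners (score : List (String × Int)) (m : Int) (x : String) :
    PySem.Set.contains (PySem.Set.ofList ((score.filter (fun p => p.2 == m)).map (fun p => p.1))) x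
    = score.any (fun j => x == j.1 && j.2 == m) := by
  rw [Bool.eq_iff_iff]
  simp only [PySem.Set.contains, List.contains_iff_mem, PySem.Set.mem_ofList,
    List.mem_map, List.mem_filter, List.any_eq_true]
  constructor
  · rintro ⟨j, ⟨hj, hm⟩, hx⟩
    refine ⟨j, hj, ?_⟩
    rw [Bool.and_eq_true]
    exact ⟨beq_iff_eq.mpr hx.symm, hm⟩
  · rintro ⟨j, hj, hp⟩
    have h1 : x = j.1 := by simpa using (Bool.and_elim_left hp)
    have h2 : (j.2 == m) = true := Bool.and_elim_right hp
    exact ⟨j, ⟨hj, h2⟩, h1.symm⟩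

-- the head of the value-sorted list carries the minimum of the values
theorem pv_head_min (score : List (String × Int)) (e0 : String × Int) (t : List (String × Int))
    (h : PySem.List.sorted score (fun e => e.2) = e0 :: t) :
    PySem.List.min? (score.map (fun p => p.2)) (fun v => v) = some e0.2 := by
  have hne : score.map (fun p => p.2) ≠ [] := by
    intro hnil
    have : score = [] := by simpa using hnil
    rw [this] at h
    have h0 : PySem.List.sorted ([] : List (String × Int)) (fun e => e.2) = [] :=
      (PySem.List.sorted_eq_nil_iff _ _ _).mpr rfl
    rw [h0] at h
    exact List.cons_ne_nil e0 t h.symm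
  cases hmin : PySem.List.min? (score.map (fun p => p.2)) (fun v => v) with
  | none => exact absurd ((PySem.List.min?_eq_none_iff _ _).mp hmin) hne
  | some m =>
    have hmem : m ∈ score.map (fun p => p.2) := PySem.List.min?_mem hmin
    have he0 : e0 ∈ score := by
      have : e0 ∈ PySem.List.sorted score (fun e => e.2) := by rw [h]; exact List.mem_cons_self
      exact (PySem.List.mem_sorted score (fun e => e.2) false e0).mp this
    have h1 : m ≤ e0.2 := PySem.List.min?_isMin hmin e0.2 (List.mem_map_of_mem he0)
    have h2 : e0.2 ≤ m := by
      obtain ⟨y, hy, hym⟩ := List.mem_map.mp hmem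
      have hle := PySem.List.key_head_sorted_le score (fun e => e.2) h y hy
      simp only at hle hym
      omega
    have : m = e0.2 := le_antisymm h1 h2
    rw [this]

-- ===== VERDICT (by name: the statement is the Claim_ definition above) =====
theorem change_minimal_3_7_spec : Claim_equal_change_minimal_3_7 := by
  intro one_line score _hdom hpre
  unfold Spec_change_minimal_3_7
  simp only [change_minimal_3_7, change_minimal_3_7_alt]
  cases hs : PySem.List.sorted score (fun e => e.2) with
  | nil => exact absurd ((PySem.List.sorted_eq_nil_iff score (fun e => e.2) false).mp hs) hpre
  | cons e0 t =>
    have hget : PySem.List.pyGet? (e0 :: t) 0 = some e0 := by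
      simp [PySem.List.pyGet?, PySem.List.pyIdx?]
    rw [hget, pv_head_min score e0 t hs]
    show (PySem.List.pyRange 0 (((PySem.Str.split? one_line " ").getD []).length : Int) 1).foldl
        (fun tmp i => (e0 :: t).foldl (fun tmp j =>
            if PySem.Str.lower (PySem.List.pyGetD tmp i "") == j.1 && j.2 == e0.2
            then PySem.List.pySetD tmp i "PYTHON" else tmp) tmp)
        ((PySem.Str.split? one_line " ").getD [])
      = ((PySem.Str.split? one_line " ").getD []).map (fun w =>
          if PySem.Set.contains (PySem.Set.ofList ((score.filter (fun p => p.2 == e0.2)).map (fun p => p.1))) (PySem.Str.lower w) then "PYTHON" else w)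
    have houter := pv_outer_fold (e0 :: t) e0.2 ((PySem.Str.split? one_line " ").getD []) []
    simp only [List.length_nil, Nat.cast_zero, List.nil_append, Nat.zero_add] at houter
    rw [houter]
    apply List.map_congr_left
    intro w _
    rw [pv_fold_any, ← hs, pv_any_sorted score (fun j => PySem.Str.lower w == j.1 && j.2 == e0.2),
      ← pv_mem_winners score e0.2 (PySem.Str.lower w)]
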